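-- pv_equiv track=rewrite | github.com/kuc2477/dl-papers | Model-Optimization/splitnet/pytorch/splits.py | _allocate_supergroups_equally
-- ===== SOURCE A (Python) =====
-- def _allocate_supergroups_equally(subgroups, supergroups):
--     assert subgroups >= supergroups
--     # decide how many subgroups belongs to each supergroup.
--     supergroup_elements = [
--         (subgroups + supergroups - i - 1) // supergroups for i in
--         range(supergroups)
--     ]
--     # define the supergroup-to-subgroups allocations.
--     supergroup_allocations = [
--         [supergroup] * n for supergroup, n in
--         enumerate(supergroup_elements)
--     ]
--     # return the subgroup-to-supergroup allocations.
--     return [e for l in supergroup_allocations for e in l]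
-- ===== SOURCE B (Python) =====
-- def _allocate_supergroups_equally(subgroups, supergroups):
--     assert subgroups >= supergroups
--     if supergroups <= 0:
--         return []
--     # the first r supergroups get q+1 subgroups, the rest get q;
--     # compute each position's label directly from its index.
--     q, r = divmod(subgroups, supergroups)
--     split = r * (q + 1)
--     return [j // (q + 1) if j < split else r + (j - split) // q
--             for j in range(subgroups)]
-- ===== Notes on version B (the rewrite author's own statement) =====
-- stated objective: alternative
-- what changed: Instead of building a per-supergroup count table, expanding it into nested lists and flattening, B computes each output position's label directly with a closed-form divmod-based index formula in one pass over range(subgroups).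
import Mathlib
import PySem

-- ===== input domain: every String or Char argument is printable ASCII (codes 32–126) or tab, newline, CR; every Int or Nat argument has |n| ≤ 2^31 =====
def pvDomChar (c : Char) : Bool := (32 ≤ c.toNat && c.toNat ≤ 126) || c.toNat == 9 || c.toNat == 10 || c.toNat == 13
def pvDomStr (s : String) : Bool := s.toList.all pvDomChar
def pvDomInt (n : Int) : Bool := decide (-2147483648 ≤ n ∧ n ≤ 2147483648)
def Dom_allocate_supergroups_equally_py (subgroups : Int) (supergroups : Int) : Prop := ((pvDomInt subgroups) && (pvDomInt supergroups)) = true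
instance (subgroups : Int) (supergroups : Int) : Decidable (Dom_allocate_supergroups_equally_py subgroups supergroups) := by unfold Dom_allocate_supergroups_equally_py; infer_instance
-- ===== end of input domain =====

-- B replaces A's count-table + nested-list flattening by a closed-form per-position
-- label formula (alternative decomposition, same asymptotic cost).

-- ===== PORT A =====
-- Python A: count table [(n+s-i-1)//s for i in range(s)], nested lists [i]*count, flattened.
def allocate_supergroups_equally_py (subgroups : Int) (supergroups : Int) : List Int :=
  let supergroup_elements : List Int :=
    (PySem.List.pyRange 0 supergroups 1).map
      (fun i => PySem.Int.floordiv (subgroups + supergroups - i - 1) supergroups)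
  let supergroup_allocations : List (List Int) :=
    (PySem.List.enumerate supergroup_elements 0).map
      (fun p => PySem.List.pyRepeat [p.1] p.2)
  supergroup_allocations.flatMap id

-- ===== PORT B =====
-- Python B: q, r = divmod(n, s); label of j = j//(q+1) if j < r*(q+1) else r + (j - r*(q+1))//q.
def allocate_supergroups_equally_py_alt (subgroups : Int) (supergroups : Int) : List Int :=
  if subgroups < supergroups then []  -- the assert (B raises there too; Pre_ excludes it)
  else if supergroups ≤ 0 then []
  else
    let q := PySem.Int.floordiv subgroups supergroups
    let r := PySem.Int.mod subgroups supergroups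
    let split := r * (q + 1)
    (PySem.List.pyRange 0 subgroups 1).map
      (fun j => if j < split then PySem.Int.floordiv j (q + 1)
                else r + PySem.Int.floordiv (j - split) q)

-- ===== PRECONDITION & SPEC =====
-- Pre_ excludes exactly the inputs on which A's leading `assert subgroups >= supergroups` raises.
def Pre_allocate_supergroups_equally_py (subgroups : Int) (supergroups : Int) : Prop :=
  supergroups ≤ subgroups
instance (subgroups : Int) (supergroups : Int) : Decidable (Pre_allocate_supergroups_equally_py subgroups supergroups) := by unfold Pre_allocate_supergroups_equally_py; infer_instance

def pvWitness_allocate_supergroups_equally_py : Int × Int := (7, 3)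

def Spec_allocate_supergroups_equally_py (subgroups : Int) (supergroups : Int) (out : List Int) : Prop := out = allocate_supergroups_equally_py_alt subgroups supergroups
instance (subgroups : Int) (supergroups : Int) (out : List Int) : Decidable (Spec_allocate_supergroups_equally_py subgroups supergroups out) := by unfold Spec_allocate_supergroups_equally_py; infer_instance

-- ===== CLAIM (what is proved, stated in full; the proofs are below) =====
def Claim_equal_allocate_supergroups_equally_py : Prop := ∀ (subgroups : Int) (supergroups : Int), Dom_allocate_supergroups_equally_py subgroups supergroups → Pre_allocate_supergroups_equally_py subgroups supergroups → Spec_allocate_supergroups_equally_py subgroups supergroups (allocate_supergroups_equally_py subgroups supergroups)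

-- ===== LEMMAS AND PROOFS =====

-- cumulative number of subgroups allocated to supergroups 0..g-1 (q = n//s, r = n%s)
def pvCum (q r g : Int) : Int := g * q + min g r

-- the label B assigns to position j
def pvLab (q r j : Int) : Int :=
  if j < r * (q + 1) then PySem.Int.floordiv j (q + 1)
  else r + PySem.Int.floordiv (j - r * (q + 1)) q

-- enumerate of a map over an index range pairs each index with its image
lemma pvEnumerate_map_pyRange (f : Int → Int) (b : Int) :
    ∀ (k : Nat) (a : Int), k = (b - a).toNat →
    PySem.List.enumerate ((PySem.List.pyRange a b 1).map f) a
      = (PySem.List.pyRange a b 1).map (fun i => (i, f i)) := by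
  intro k
  induction k with
  | zero =>
      intro a hk
      rw [PySem.List.pyRange_one_eq_nil (by omega)]
      simp [PySem.List.enumerate_nil]
  | succ k ih =>
      intro a hk
      rw [PySem.List.pyRange_one_cons (by omega)]
      simp only [List.map_cons, PySem.List.enumerate_cons]
      rw [ih (a + 1) (by omega)]

-- F1: the count A computes for supergroup g equals pvCum (g+1) - pvCum g
lemma pvCount_eq (n s q r g : Int) (hs : 0 < s) (hg0 : 0 ≤ g) (hgs : g < s)
    (hn : n = q * s + r) (hr0 : 0 ≤ r) (hrs : r < s) :
    PySem.Int.floordiv (n + s - g - 1) s = pvCum q r (g + 1) - pvCum q r g := by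
  unfold pvCum
  by_cases h : g < r
  · rw [min_eq_left (by omega), min_eq_left (by omega)]
    rw [PySem.Int.floordiv_eq_iff_of_pos hs]
    constructor <;> nlinarith
  · rw [min_eq_right (by omega), min_eq_right (by omega)]
    rw [PySem.Int.floordiv_eq_iff_of_pos hs]
    constructor <;> nlinarith

-- F2: every position j in [pvCum g, pvCum (g+1)) gets label g
lemma pvLab_eq (q r g j : Int) (hq : 1 ≤ q)
    (hj1 : pvCum q r g ≤ j) (hj2 : j < pvCum q r (g + 1)) :
    pvLab q r j = g := by
  unfold pvCum at hj1 hj2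
  unfold pvLab
  by_cases h : g < r
  · rw [min_eq_left (by omega)] at hj1
    rw [min_eq_left (by omega)] at hj2
    rw [if_pos (by nlinarith)]
    rw [PySem.Int.floordiv_eq_iff_of_pos (by omega)]
    constructor <;> nlinarith
  · rw [min_eq_right (by omega)] at hj1
    rw [min_eq_right (by omega)] at hj2
    have hge : ¬ j < r * (q + 1) := by nlinarith [mul_nonneg (by omega : (0:Int) ≤ g - r) (by omega : (0:Int) ≤ q)]
    rw [if_neg hge]
    have : PySem.Int.floordiv (j - r * (q + 1)) q = g - r := by
      rw [PySem.Int.floordiv_eq_iff_of_pos (by omega)]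
      constructor <;> nlinarith
    rw [this]; ring

-- main induction: A's blocks from supergroup g on = B's labels from position pvCum g on
lemma pvMain (n s q r : Int) (hs : 0 < s) (hsn : s ≤ n) (hq : 1 ≤ q)
    (hn : n = q * s + r) (hr0 : 0 ≤ r) (hrs : r < s) :
    ∀ (k : Nat) (g : Int), 0 ≤ g → g ≤ s → k = (s - g).toNat →
      (PySem.List.pyRange g s 1).flatMap
          (fun i => List.replicate (PySem.Int.floordiv (n + s - i - 1) s).toNat i)
        = (PySem.List.pyRange (pvCum q r g) n 1).map (pvLab q r) := by
  intro k
  induction k with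
  | zero =>
      intro g hg0 hgs hk
      have hgse : g = s := by omega
      subst hgse
      have hc : pvCum q r g = n := by
        unfold pvCum; rw [min_eq_right (by omega)]; linarith
      rw [PySem.List.pyRange_one_eq_nil le_rfl, hc,
          PySem.List.pyRange_one_eq_nil le_rfl]
      simp
  | succ k ih =>
      intro g hg0 hgs hk
      have hlt : g < s := by omega
      have hmono : min g r ≤ min (g + 1) r := by omega
      have hle1 : pvCum q r g ≤ pvCum q r (g + 1) := by
        unfold pvCum; nlinarith
      have hle2 : pvCum q r (g + 1) ≤ n := by
        unfold pvCum
        have h1 : min (g + 1) r ≤ r := min_le_right _ _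
        have h2 : 0 ≤ (s - (g + 1)) * q := mul_nonneg (by omega) (by omega)
        nlinarith
      rw [PySem.List.pyRange_one_cons hlt, List.flatMap_cons,
          PySem.List.pyRange_one_append (pvCum q r g) (pvCum q r (g + 1)) n hle1 hle2,
          List.map_append, ih (g + 1) (by omega) (by omega) (by omega)]
      congr 1
      symm
      rw [List.eq_replicate_iff]
      refine ⟨?_, ?_⟩
      · rw [List.length_map, PySem.List.length_pyRange_one,
            pvCount_eq n s q r g hs hg0 hlt hn hr0 hrs]
      · intro b hb
        rcases List.mem_map.mp hb with ⟨x, hx, rfl⟩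
        rcases (PySem.List.mem_pyRange_one).mp hx with ⟨hx1, hx2⟩
        exact pvLab_eq q r g x hq hx1 hx2

-- ===== VERDICT (by name: the statement is the Claim_ definition above) =====
theorem allocate_supergroups_equally_py_spec : Claim_equal_allocate_supergroups_equally_py := by
  intro n s _ hpre
  unfold Pre_allocate_supergroups_equally_py at hpre
  unfold Spec_allocate_supergroups_equally_py
  unfold allocate_supergroups_equally_py allocate_supergroups_equally_py_alt
  rw [if_neg (by omega)]
  by_cases hs : s ≤ 0
  · rw [if_pos hs, PySem.List.pyRange_one_eq_nil hs]
    simp [PySem.List.enumerate_nil]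
  · rw [not_le] at hs
    rw [if_neg (by omega)]
    set q := PySem.Int.floordiv n s with hqdef
    set r := PySem.Int.mod n s with hrdef
    have hn : n = q * s + r := by
      rw [hqdef, hrdef]; exact (PySem.Int.floordiv_mul_add_mod n s).symm
    have hr0 : 0 ≤ r := PySem.Int.mod_nonneg n hs
    have hrs : r < s := PySem.Int.mod_lt n hs
    have hq : 1 ≤ q := by nlinarith
    dsimp only
    rw [pvEnumerate_map_pyRange _ s (s - 0).toNat 0 rfl]
    simp only [List.map_map, Function.comp_def, PySem.List.pyRepeat_singleton]
    rw [List.flatMap_map]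
    have h0 : pvCum q r 0 = 0 := by unfold pvCum; omega
    have hmain := pvMain n s q r hs (by omega) hq hn hr0 hrs (s - 0).toNat 0 le_rfl (by omega) rfl
    rw [h0] at hmain
    simp only [id]
    rw [hmain]
    rfl
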